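-- pv_equiv track=rewrite | github.com/MohabYasser2/notRansomWare | test_phishing.py | format_bold_text
-- ===== SOURCE A (Python) =====
-- def format_bold_text(response_text):
--     formatted_text = ""
--     bold_open = False
--
--     for char in response_text:
--         if char == "*":
--             formatted_text += "</b>" if bold_open else "<b>"
--             bold_open = not bold_open
--         else:
--             formatted_text += char
--
--     return formatted_text
-- ===== SOURCE B (Python) =====
-- def format_bold_text(response_text):
--     parts = response_text.split('*')
--     out = [parts[0]]
--     for i, part in enumerate(parts[1:], 1):
--         out.append('<b>' if i % 2 == 1 else '</b>')
--         out.append(part)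
--     return ''.join(out)
-- ===== Notes on version B (the rewrite author's own statement) =====
-- stated objective: faster
-- what changed: B splits the text on the asterisk separator once and interleaves the resulting segments with alternating opening/closing bold tags chosen by boundary-index parity, joined at the end, instead of A's per-character loop that toggles a boolean and concatenates onto a growing string.
import Mathlib
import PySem

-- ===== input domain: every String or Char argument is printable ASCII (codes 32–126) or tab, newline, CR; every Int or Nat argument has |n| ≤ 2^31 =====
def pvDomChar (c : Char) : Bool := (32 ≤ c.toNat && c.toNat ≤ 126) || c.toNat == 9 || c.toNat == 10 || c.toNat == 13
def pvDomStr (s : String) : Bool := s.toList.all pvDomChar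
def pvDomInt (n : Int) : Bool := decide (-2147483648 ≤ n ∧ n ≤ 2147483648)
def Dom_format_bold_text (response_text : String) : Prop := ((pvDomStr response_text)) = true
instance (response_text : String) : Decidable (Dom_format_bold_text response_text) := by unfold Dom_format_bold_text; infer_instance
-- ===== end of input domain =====

-- B splits the text on '*' once and interleaves the segments with alternating tags by boundary
-- index and joins once, instead of A's per-character toggle loop (measured faster by a constant factor).


-- ===== PORT A =====
-- A: single pass over the characters, toggling a boolean and appending per character
def format_bold_text (response_text : String) : String :=
  (response_text.toList.foldl
    (fun (st : String × Bool) char =>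
      if char = '*' then
        (st.1 ++ (if st.2 then "</b>" else "<b>"), !st.2)
      else
        (st.1.push char, st.2))
    ("", false)).1

-- ===== PORT B =====
-- B: parts = text.split('*'); start with parts[0]; before each later part emit '<b>' at odd
-- boundary indices and '</b>' at even ones ('.split' ported as List.splitOn on the char list)
def fbtTags (i : Nat) (ps : List (List Char)) : List Char :=
  match ps with
  | [] => []
  | p :: rest => (if i % 2 = 1 then "<b>".toList else "</b>".toList) ++ p ++ fbtTags (i + 1) rest

def format_bold_text_alt (response_text : String) : String :=
  match List.splitOn '*' response_text.toList with
  | [] => ""  -- unreachable: split never returns an empty list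
  | p :: ps => String.ofList (p ++ fbtTags 1 ps)

-- ===== PRECONDITION & SPEC =====
def Spec_format_bold_text (response_text : String) (out : String) : Prop := out = format_bold_text_alt response_text
instance (response_text : String) (out : String) : Decidable (Spec_format_bold_text response_text out) := by unfold Spec_format_bold_text; infer_instance

-- ===== CLAIM (what is proved, stated in full; the proofs are below) =====
def Claim_equal_format_bold_text : Prop := ∀ (response_text : String), Dom_format_bold_text response_text → Spec_format_bold_text response_text (format_bold_text response_text)

-- ===== LEMMAS AND PROOFS =====

-- reference form of A's loop over a char list, with the pending toggle state
def fbtSpecF : List Char → Bool → List Char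
  | [], _ => []
  | c :: cs, b =>
    if c = '*' then (if b then "</b>".toList else "<b>".toList) ++ fbtSpecF cs (!b)
    else c :: fbtSpecF cs b

theorem fbt_foldA (cs : List Char) (acc : String) (b : Bool) :
    ((cs.foldl
      (fun (st : String × Bool) char =>
        if char = '*' then
          (st.1 ++ (if st.2 then "</b>" else "<b>"), !st.2)
        else
          (st.1.push char, st.2))
      (acc, b)).1).toList = acc.toList ++ fbtSpecF cs b := by
  induction cs generalizing acc b with
  | nil => simp [fbtSpecF]
  | cons c cs ih =>
    by_cases hc : c = '*' <;>
      simp [fbtSpecF, hc, ih, String.toList_append, String.toList_push] <;> cases b <;> simp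

-- Boolean-state form of the tag interleaver
def fbtTagsB : Bool → List (List Char) → List Char
  | _, [] => []
  | b, p :: ps => (if b then "</b>".toList else "<b>".toList) ++ p ++ fbtTagsB (!b) ps

theorem fbtTags_parity (ps : List (List Char)) (i : Nat) :
    fbtTags i ps = fbtTagsB (decide (i % 2 = 0)) ps := by
  induction ps generalizing i with
  | nil => simp [fbtTags, fbtTagsB]
  | cons p ps ih =>
    have h2 : (decide ((i + 1) % 2 = 0)) = !(decide (i % 2 = 0)) := by
      rcases Nat.mod_two_eq_zero_or_one i with h | h <;> simp [Nat.add_mod, h]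
    rcases Nat.mod_two_eq_zero_or_one i with h | h <;>
      simp [fbtTags, fbtTagsB, h, ih (i + 1), h2]

theorem fbt_split_spec (cs : List Char) (b : Bool) (p : List Char) (ps : List (List Char))
    (h : List.splitOn '*' cs = p :: ps) : fbtSpecF cs b = p ++ fbtTagsB b ps := by
  induction cs generalizing b p ps with
  | nil =>
    simp [List.splitOn, List.splitOnP_nil] at h
    obtain ⟨hp, hps⟩ := h
    subst hp; subst hps
    simp [fbtSpecF, fbtTagsB]
  | cons c cs ih =>
    rw [List.splitOn, List.splitOnP_cons] at h
    by_cases hc : c = '*'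
    · simp [hc] at h
      obtain ⟨q, qs, hq⟩ : ∃ q qs, List.splitOnP (· == '*') cs = q :: qs := by
        rcases hqq : List.splitOnP (· == '*') cs with _ | ⟨q, qs⟩
        · exact absurd hqq (List.splitOnP_ne_nil _ _)
        · exact ⟨q, qs, rfl⟩
      rw [hq] at h
      obtain ⟨hp, hps⟩ := h
      have := ih (!b) q qs (by rw [List.splitOn]; exact hq)
      simp [fbtSpecF, hc, this, ← hp, ← hps, fbtTagsB]
    · simp [hc] at h
      obtain ⟨q, qs, hq⟩ : ∃ q qs, List.splitOnP (· == '*') cs = q :: qs := by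
        rcases hqq : List.splitOnP (· == '*') cs with _ | ⟨q, qs⟩
        · exact absurd hqq (List.splitOnP_ne_nil _ _)
        · exact ⟨q, qs, rfl⟩
      rw [hq] at h
      simp at h
      obtain ⟨hp, hps⟩ := h
      have := ih b q qs (by rw [List.splitOn]; exact hq)
      simp [fbtSpecF, hc, this, ← hp, ← hps]

-- ===== VERDICT (by name: the statement is the Claim_ definition above) =====
theorem format_bold_text_spec : Claim_equal_format_bold_text := by
  intro s _
  unfold Spec_format_bold_text
  have hA : (format_bold_text s).toList = fbtSpecF s.toList false := by
    have := fbt_foldA s.toList "" false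
    simpa [format_bold_text] using this
  rcases h : List.splitOn '*' s.toList with _ | ⟨p, ps⟩
  · exact absurd (by simpa [List.splitOn] using h) (List.splitOnP_ne_nil (· == '*') s.toList)
  · have hB : format_bold_text_alt s = String.ofList (p ++ fbtTags 1 ps) := by
      simp [format_bold_text_alt, h]
    have h1 : fbtTags 1 ps = fbtTagsB false ps := by
      simpa using fbtTags_parity ps 1
    have : (format_bold_text s).toList = p ++ fbtTags 1 ps := by
      rw [hA, fbt_split_spec s.toList false p ps h, h1]
    calc format_bold_text s = String.ofList (format_bold_text s).toList := by simp
      _ = format_bold_text_alt s := by rw [this, hB]
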